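-- pv_equiv track=rewrite | github.com/golfyangkee/daily_quiz | 프로그래머스/0/181918. 배열 만들기 4/배열 만들기 4.py | solution
-- ===== SOURCE A (Python) =====
-- def solution(arr):
--     stk = []
--     num = len(arr)
--     i=0
--     while i<num:
--         if stk == []:
--             stk.append(arr[i])
--             i +=1
--         elif stk[-1]<arr[i]:
--             stk.append(arr[i])
--             i+=1
--         elif stk[-1] >= arr[i]:
--             stk = stk[:-1]
--     return stk
-- ===== SOURCE B (Python) =====
-- def solution(arr):
--     # An element survives A's stack iff it is strictly smaller than every
--     # element after it, so one right-to-left pass with a running minimum suffices.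
--     res = []
--     m = None
--     for x in reversed(arr):
--         if m is None or x < m:
--             res.append(x)
--             m = x
--     return res[::-1]
-- ===== Notes on version B (the rewrite author's own statement) =====
-- stated objective: faster
-- what changed: Replaces the monotonic-stack state machine (push if greater than top, else slice-copy pop without advancing) by a single right-to-left pass keeping an element iff it is below the running minimum of its suffix, then reversing the collected list; no stack at all.
import Mathlib
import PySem

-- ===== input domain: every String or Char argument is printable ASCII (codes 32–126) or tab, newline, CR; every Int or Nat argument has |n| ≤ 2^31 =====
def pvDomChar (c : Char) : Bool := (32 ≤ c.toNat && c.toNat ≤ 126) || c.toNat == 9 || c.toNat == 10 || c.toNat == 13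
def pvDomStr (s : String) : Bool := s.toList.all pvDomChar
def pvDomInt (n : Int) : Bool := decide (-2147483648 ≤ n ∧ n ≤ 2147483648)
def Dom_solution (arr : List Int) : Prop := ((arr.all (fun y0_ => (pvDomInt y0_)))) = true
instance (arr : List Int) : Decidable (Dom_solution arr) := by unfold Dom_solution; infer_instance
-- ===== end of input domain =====

-- B replaces A's monotonic-stack state machine by a single right-to-left pass with a
-- running minimum (an element survives iff it is strictly smaller than everything after it).

-- ===== PORT A =====
-- A's while loop over index i with stack stk; the pop branch (stk[-1] >= arr[i]) does not
-- advance i. Measure: 2*(len - i) + |stk|.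
def solutionLoop (arr stk : List Int) (i : Nat) : List Int :=
  if h : i < arr.length then
    if stk = [] then
      solutionLoop arr (stk ++ [arr[i]]) (i + 1)
    else if stk.getLast! < arr[i] then
      solutionLoop arr (stk ++ [arr[i]]) (i + 1)
    else
      -- stk[-1] >= arr[i]: stk = stk[:-1], i unchanged
      solutionLoop arr stk.dropLast i
  else stk
termination_by 2 * (arr.length - i) + stk.length
decreasing_by
  · simp; omega
  · simp; omega
  · have : stk.dropLast.length < stk.length := by
      rename_i hne _; cases stk with
      | nil => simp at hne
      | cons a t => simp [List.length_dropLast]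
    omega

def solution (arr : List Int) : List Int := solutionLoop arr [] 0

-- ===== PORT B =====
-- state of B's for loop over reversed(arr): (res, m) with m the running minimum (None initially)
def bStep (p : List Int × Option Int) (x : Int) : List Int × Option Int :=
  match p.2 with
  | none => (p.1 ++ [x], some x)
  | some m => if x < m then (p.1 ++ [x], some x) else p

def solution_alt (arr : List Int) : List Int :=
  (arr.reverse.foldl bStep ([], none)).1.reverse

-- ===== PRECONDITION & SPEC =====
def Spec_solution (arr : List Int) (out : List Int) : Prop := out = solution_alt arr
instance (arr : List Int) (out : List Int) : Decidable (Spec_solution arr out) := by unfold Spec_solution; infer_instance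

-- ===== CLAIM (what is proved, stated in full; the proofs are below) =====
def Claim_equal_solution : Prop := ∀ (arr : List Int), Dom_solution arr → Spec_solution arr (solution arr)

-- ===== LEMMAS AND PROOFS =====

-- proof-only model of A's pop phase: pop from the end while last >= x
def popGE (x : Int) (stk : List Int) : List Int :=
  if stk ≠ [] ∧ x ≤ stk.getLast! then popGE x stk.dropLast else stk
termination_by stk.length
decreasing_by
  rename_i h; cases stk with
  | nil => exact absurd rfl h.1
  | cons a t => simp [List.length_dropLast]

def aStep (stk : List Int) (x : Int) : List Int := popGE x stk ++ [x]

-- the common specification: the strict suffix-minima, by structural recursion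
def sfxMin : List Int → List Int
  | [] => []
  | x :: r => match sfxMin r with
    | [] => [x]
    | m :: t => if x < m then x :: m :: t else m :: t

-- glue a strictly increasing stack onto a result list
def attachTW (stk res : List Int) : List Int :=
  match res with
  | [] => stk
  | m :: t => stk.takeWhile (fun y => decide (y < m)) ++ m :: t

theorem popGE_nil (x : Int) : popGE x [] = [] := by rw [popGE]; simp

theorem popGE_lt (x : Int) (stk : List Int) (hlt : stk.getLast! < x) :
    popGE x stk = stk := by
  rw [popGE, if_neg]; intro hc; omega

theorem popGE_ge (x : Int) (stk : List Int) (h : stk ≠ []) (hge : x ≤ stk.getLast!) :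
    popGE x stk = popGE x stk.dropLast := by
  conv_lhs => rw [popGE]
  rw [if_pos ⟨h, hge⟩]

-- A's loop from state (stk, i) is a left fold of aStep over the remaining suffix
theorem loop_eq_fold (arr stk : List Int) (i : Nat) :
    solutionLoop arr stk i = (arr.drop i).foldl aStep stk := by
  rw [solutionLoop]
  split
  · rename_i h
    have hd : arr.drop i = arr[i] :: arr.drop (i + 1) := List.drop_eq_getElem_cons h
    rw [hd, List.foldl_cons]
    split
    · rename_i he
      rw [loop_eq_fold arr (stk ++ [arr[i]]) (i + 1), he]
      simp [aStep, popGE_nil]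
    · split
      · rename_i hne hlt
        rw [loop_eq_fold arr (stk ++ [arr[i]]) (i + 1)]
        simp [aStep, popGE_lt _ _ hlt]
      · rename_i hne hnlt
        rw [loop_eq_fold arr stk.dropLast i, hd, List.foldl_cons]
        have hx : popGE arr[i] stk = popGE arr[i] stk.dropLast :=
          popGE_ge arr[i] stk hne (by omega)
        simp [aStep, hx]
  · rename_i h
    rw [List.drop_of_length_le (by omega)]
    simp
termination_by 2 * (arr.length - i) + stk.length
decreasing_by
  all_goals
    first
      | (simp; omega)
      | (have hlen : stk.dropLast.length < stk.length := by
           rename_i hne _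
           cases stk with
           | nil => exact absurd rfl hne
           | cons a t => simp [List.length_dropLast]
         omega)

theorem getLast!_concat (s : List Int) (a : Int) : (s ++ [a]).getLast! = a := by
  simp [List.getLast!_eq_getLast?_getD, List.getLast?_append]

theorem mem_takeWhile_lt {x : Int} {l : List Int} {y : Int}
    (h : y ∈ l.takeWhile (fun z => decide (z < x))) : y < x := by
  have := List.mem_takeWhile_imp h
  simpa using this

-- on a strictly increasing stack, popping >= x from the end is takeWhile (< x)
theorem popGE_eq_takeWhile (x : Int) (stk : List Int)
    (hp : stk.Pairwise (· < ·)) :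
    popGE x stk = stk.takeWhile (fun y => decide (y < x)) := by
  induction stk using List.reverseRecOn with
  | nil => simp [popGE_nil]
  | append_singleton s a ih =>
    by_cases hxa : x ≤ a
    · rw [popGE_ge x (s ++ [a]) (by simp) (by rw [getLast!_concat]; exact hxa)]
      rw [List.dropLast_concat]
      rw [ih (hp.sublist (by simp))]
      rw [List.takeWhile_append]
      split
      · rename_i hlen
        have hself : s.takeWhile (fun y => decide (y < x)) = s :=
          (List.takeWhile_prefix _).eq_of_length hlen
        have : (x ≤ a) = True := by simp [hxa]
        simp [hself, List.takeWhile, show ¬ (a < x) by omega]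
      · rfl
    · rw [popGE_lt x (s ++ [a]) (by rw [getLast!_concat]; omega)]
      have hall : ∀ y ∈ s ++ [a], decide (y < x) = true := by
        intro y hy
        rcases List.mem_append.mp hy with hys | hya
        · have : y < a := (List.pairwise_append.mp hp).2.2 y hys a (by simp)
          simp; omega
        · simp at hya; simp; omega
      exact (List.takeWhile_eq_self_iff.mpr hall).symm

theorem pairwise_aStep (stk : List Int) (x : Int) (hp : stk.Pairwise (· < ·)) :
    (aStep stk x).Pairwise (· < ·) := by
  unfold aStep
  rw [popGE_eq_takeWhile x stk hp]
  apply List.pairwise_append.mpr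
  refine ⟨hp.sublist (List.takeWhile_sublist _), by simp, ?_⟩
  intro y hy z hz
  simp at hz; subst hz
  exact mem_takeWhile_lt hy

-- takeWhile (< m) after takeWhile (< x) = takeWhile (< m) when m <= x
theorem takeWhile_takeWhile_le (m x : Int) (hmx : m ≤ x) (l : List Int) :
    (l.takeWhile (fun y => decide (y < x))).takeWhile (fun y => decide (y < m))
      = l.takeWhile (fun y => decide (y < m)) := by
  induction l with
  | nil => rfl
  | cons b t ih =>
    by_cases hbm : b < m
    · have hbx : b < x := by omega
      simp [hbm, hbx, ih]
    · by_cases hbx : b < x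
      · simp [hbm, hbx]
      · simp [hbm, hbx]

-- key invariant: folding aStep over l from a strictly increasing stack
theorem fold_aStep_eq (l : List Int) :
    ∀ stk : List Int, stk.Pairwise (· < ·) →
      l.foldl aStep stk = attachTW stk (sfxMin l) := by
  induction l with
  | nil => intro stk _; simp [sfxMin, attachTW]
  | cons x r ih =>
    intro stk hp
    rw [List.foldl_cons, ih (aStep stk x) (pairwise_aStep stk x hp)]
    have hstep : aStep stk x = stk.takeWhile (fun y => decide (y < x)) ++ [x] := by
      unfold aStep; rw [popGE_eq_takeWhile x stk hp]
    cases hr : sfxMin r with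
    | nil =>
      have : sfxMin (x :: r) = [x] := by unfold sfxMin; rw [hr]
      rw [this, hstep]
      simp [attachTW]
    | cons m t =>
      by_cases hxm : x < m
      · have hc : sfxMin (x :: r) = x :: m :: t := by
          unfold sfxMin; rw [hr]; simp [hxm]
        rw [hc, hstep]
        simp only [attachTW]
        have htw : (stk.takeWhile (fun y => decide (y < x)) ++ [x]).takeWhile
            (fun y => decide (y < m))
              = stk.takeWhile (fun y => decide (y < x)) ++ [x] := by
          apply List.takeWhile_eq_self_iff.mpr
          intro y hy
          rcases List.mem_append.mp hy with h1 | h2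
          · have := mem_takeWhile_lt h1; simp; omega
          · simp at h2; subst h2; simp; omega
        rw [htw]; simp
      · have hc : sfxMin (x :: r) = m :: t := by
          unfold sfxMin; rw [hr]; simp [hxm]
        rw [hc, hstep]
        simp only [attachTW]
        have htw : (stk.takeWhile (fun y => decide (y < x)) ++ [x]).takeWhile
            (fun y => decide (y < m))
              = stk.takeWhile (fun y => decide (y < m)) := by
          rw [List.takeWhile_append]
          split
          · rename_i hlen
            have hself : (stk.takeWhile (fun y => decide (y < x))).takeWhile
                (fun y => decide (y < m)) = stk.takeWhile (fun y => decide (y < x)) :=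
              (List.takeWhile_prefix _).eq_of_length hlen
            rw [takeWhile_takeWhile_le m x (by omega) stk] at hself
            simp [List.takeWhile, show ¬ (x < m) from hxm, hself]
          · exact takeWhile_takeWhile_le m x (by omega) stk
        rw [htw]

-- A computes the strict suffix-minima
theorem solution_eq_sfxMin (arr : List Int) : solution arr = sfxMin arr := by
  unfold solution
  rw [loop_eq_fold arr [] 0]
  simp only [List.drop_zero]
  rw [fold_aStep_eq arr [] (by simp)]
  cases h : sfxMin arr with
  | nil => rfl
  | cons m t => simp [attachTW]

-- B's fold over the reversed list computes (reversed suffix-minima, their head as minimum)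
theorem bfold_eq (arr : List Int) :
    arr.reverse.foldl bStep ([], none)
      = ((sfxMin arr).reverse, (sfxMin arr).head?) := by
  induction arr with
  | nil => simp [sfxMin]
  | cons x r ih =>
    rw [List.reverse_cons, List.foldl_append, ih, List.foldl_cons, List.foldl_nil]
    cases hr : sfxMin r with
    | nil =>
      have hc : sfxMin (x :: r) = [x] := by unfold sfxMin; rw [hr]
      simp [bStep, hc]
    | cons m t =>
      by_cases hxm : x < m
      · have hc : sfxMin (x :: r) = x :: m :: t := by
          unfold sfxMin; rw [hr]; simp [hxm]
        simp [bStep, hc, hxm]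
      · have hc : sfxMin (x :: r) = m :: t := by
          unfold sfxMin; rw [hr]; simp [hxm]
        simp [bStep, hc, hxm]

theorem solution_alt_eq_sfxMin (arr : List Int) : solution_alt arr = sfxMin arr := by
  unfold solution_alt
  rw [bfold_eq]
  simp

-- ===== VERDICT (by name: the statement is the Claim_ definition above) =====
theorem solution_spec : Claim_equal_solution := by
  intro arr _
  unfold Spec_solution
  rw [solution_eq_sfxMin, solution_alt_eq_sfxMin]
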